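-- pv_equiv track=rewrite | github.com/Aasthaengg/IBMdataset | Python_codes/p03209/s977776461.py | count_patties
-- ===== SOURCE A (Python) =====
-- def count_patties(L, x):
--     if L == 0:
--         return 0 if x <= 0 else 1
--     if x <= total_layers[L - 1] + 1:
--         return count_patties(L - 1, x - 1)
--     else:
--         return (
--             count_patties(L - 1, x - total_layers[L - 1] - 2) + 1 + total_patties[L - 1]
--         )
--
-- total_layers = [2 ** (i + 2) - 3 for i in range(51)]
--
-- total_patties = [2 ** (i + 1) - 1 for i in range(51)]
-- ===== SOURCE B (Python) =====
-- def count_patties(L, x):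
--     result = 0
--     while L > 0 and x > 0:
--         half_layers = 2 ** (L + 1) - 3      # layers of a level-(L-1) burger
--         if x >= 2 * half_layers + 3:        # the whole level-L burger is covered
--             return result + 2 ** (L + 1) - 1
--         if x <= half_layers + 1:            # bottom bun + lower half only
--             x -= 1
--         else:                               # lower half + middle patty, then upper half
--             result += 2 ** L
--             x -= half_layers + 2
--         L -= 1
--     return result + (1 if x > 0 else 0)
-- ===== Notes on version B (the rewrite author's own statement) =====
-- stated objective: alternative
-- what changed: Replaced the table-driven recursion by an iterative descent that uses closed-form powers of two instead of the precomputed arrays, adds early exits for x<=0 and for x covering a whole sub-burger, and carries an accumulator.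
import Mathlib
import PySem

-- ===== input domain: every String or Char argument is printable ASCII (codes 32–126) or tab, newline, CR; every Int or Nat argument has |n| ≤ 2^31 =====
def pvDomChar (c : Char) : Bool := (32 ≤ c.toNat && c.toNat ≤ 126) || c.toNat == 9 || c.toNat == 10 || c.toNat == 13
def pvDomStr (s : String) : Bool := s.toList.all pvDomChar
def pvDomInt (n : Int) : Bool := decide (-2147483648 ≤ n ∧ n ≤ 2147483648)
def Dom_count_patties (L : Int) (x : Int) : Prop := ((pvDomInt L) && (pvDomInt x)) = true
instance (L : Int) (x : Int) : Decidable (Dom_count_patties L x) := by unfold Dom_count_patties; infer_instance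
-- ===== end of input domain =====

-- B replaces A's table-driven recursion by an iterative descent with closed-form powers of two,
-- early exits for x<=0 and for x covering a whole sub-burger, and an accumulator (same cost class).


-- ===== PORT A =====
-- module-level constants of A's module
def pyTotalLayers : List Int := (List.range 51).map (fun i => 2 ^ (i + 2) - 3)
def pyTotalPatties : List Int := (List.range 51).map (fun i => 2 ^ (i + 1) - 1)

-- A recurses with L decreasing by 1 to the base case L == 0; on Pre_ (0 ≤ L ≤ 51)
-- every list index L-1 is in range, so pyGet?.getD 0 is exact there.
def count_patties_go : Nat → Int → Int
  | 0, x => if x ≤ 0 then 0 else 1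
  | n + 1, x =>
    let tl := (PySem.List.pyGet? pyTotalLayers (n : Int)).getD 0
    if x ≤ tl + 1 then count_patties_go n (x - 1)
    else count_patties_go n (x - tl - 2) + 1 + (PySem.List.pyGet? pyTotalPatties (n : Int)).getD 0

def count_patties (L : Int) (x : Int) : Int := count_patties_go L.toNat x

-- ===== PORT B =====
-- the while-loop of Source B, level counter as fuel; `r` is the accumulator `result`;
-- the `return` inside the loop and the `x <= 0` half of the loop guard are the early exits
def count_patties_alt_go : Nat → Int → Int → Int
  | 0, x, r => r + (if 0 < x then 1 else 0)
  | n + 1, x, r =>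
    if ¬ 0 < x then r + (if 0 < x then 1 else 0)
    else
      let hl : Int := 2 ^ (n + 2) - 3
      if 2 * hl + 3 ≤ x then r + 2 ^ (n + 2) - 1
      else if x ≤ hl + 1 then count_patties_alt_go n (x - 1) r
      else count_patties_alt_go n (x - hl - 2) (r + 2 ^ (n + 1))

def count_patties_alt (L : Int) (x : Int) : Int := count_patties_alt_go L.toNat x 0

-- ===== PRECONDITION & SPEC =====
-- Pre_ excludes L < 0 and L > 51, exactly the inputs on which A's list indexing raises IndexError.
def Pre_count_patties (L : Int) (x : Int) : Prop := 0 ≤ L ∧ L ≤ 51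
instance (L : Int) (x : Int) : Decidable (Pre_count_patties L x) := by
  unfold Pre_count_patties; infer_instance
def pvWitness_count_patties : Int × Int := (3, 5)

def Spec_count_patties (L : Int) (x : Int) (out : Int) : Prop := out = count_patties_alt L x
instance (L : Int) (x : Int) (out : Int) : Decidable (Spec_count_patties L x out) := by
  unfold Spec_count_patties; infer_instance

-- ===== CLAIM =====
def Claim_equal_count_patties : Prop := ∀ (L : Int) (x : Int), Dom_count_patties L x → Pre_count_patties L x → Spec_count_patties L x (count_patties L x)

-- ===== LEMMAS AND PROOFS =====
lemma tl_closed (n : Nat) (h : n < 51) :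
    (PySem.List.pyGet? pyTotalLayers (n : Int)).getD 0 = 2 ^ (n + 2) - 3 := by
  simp [pyTotalLayers, h]

lemma tp_closed (n : Nat) (h : n < 51) :
    (PySem.List.pyGet? pyTotalPatties (n : Int)).getD 0 = 2 ^ (n + 1) - 1 := by
  simp [pyTotalPatties, h]

lemma two_pow_ge (n : Nat) : (4 : Int) ≤ 2 ^ (n + 2) := by
  calc (4 : Int) = 2 ^ 2 := by norm_num
  _ ≤ 2 ^ (n + 2) := by
      exact pow_le_pow_right₀ (by norm_num) (by omega)

-- A returns 0 on any x ≤ 0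
lemma go_nonpos (n : Nat) (hn : n ≤ 51) : ∀ x : Int, x ≤ 0 → count_patties_go n x = 0 := by
  induction n with
  | zero => intro x hx; simp [count_patties_go, hx]
  | succ n ih =>
    intro x hx
    have h51 : n < 51 := by omega
    have htl := tl_closed n h51
    have h4 := two_pow_ge n
    simp only [count_patties_go, htl]
    rw [if_pos (by omega)]
    exact ih (by omega) _ (by omega)

-- A returns the whole patty count once x covers all 2^(n+2)-3 layers
lemma go_full (n : Nat) (hn : n ≤ 51) :
    ∀ x : Int, 2 ^ (n + 2) - 3 ≤ x → count_patties_go n x = 2 ^ (n + 1) - 1 := by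
  induction n with
  | zero => intro x hx; norm_num at hx ⊢; simp [count_patties_go]; omega
  | succ n ih =>
    intro x hx
    have h51 : n < 51 := by omega
    have htl := tl_closed n h51
    have htp := tp_closed n h51
    have h4 := two_pow_ge n
    have hx' : (2:Int) ^ (n + 3) - 3 ≤ x := by
      have : (2:Int) ^ (n + 3) = 2 ^ (n + 1 + 2) := by ring_nf
      omega
    simp only [count_patties_go, htl, htp]
    have hpow : (2:Int) ^ (n + 3) = 2 * 2 ^ (n + 2) := by ring
    rw [if_neg (by omega)]
    rw [ih (by omega) _ (by omega)]
    have : (2:Int) ^ (n + 2) = 2 * 2 ^ (n + 1) := by ring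
    omega

-- main loop invariant: B's loop equals accumulator + A's recursion
lemma alt_go_eq (n : Nat) (hn : n ≤ 51) :
    ∀ (x r : Int), count_patties_alt_go n x r = r + count_patties_go n x := by
  induction n with
  | zero =>
    intro x r
    simp only [count_patties_alt_go, count_patties_go]
    split_ifs <;> omega
  | succ n ih =>
    intro x r
    have h51 : n < 51 := by omega
    have htl := tl_closed n h51
    have htp := tp_closed n h51
    have h4 := two_pow_ge n
    by_cases hx : 0 < x
    · simp only [count_patties_alt_go, count_patties_go, htl, htp]
      rw [if_neg (by omega)]
      by_cases hfull : 2 * ((2:Int) ^ (n + 2) - 3) + 3 ≤ x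
      · rw [if_pos hfull, if_neg (by omega)]
        rw [go_full n (by omega) _ (by omega)]
        have : (2:Int) ^ (n + 2) = 2 * 2 ^ (n + 1) := by ring
        omega
      · rw [if_neg hfull]
        by_cases hlow : x ≤ (2:Int) ^ (n + 2) - 3 + 1
        · rw [if_pos hlow, if_pos (by omega), ih (by omega)]
        · rw [if_neg hlow, if_neg (by omega), ih (by omega)]
          omega
    · rw [go_nonpos (n + 1) hn x (by omega)]
      simp only [count_patties_alt_go]
      rw [if_pos hx]
      simp [hx]

-- ===== VERDICT =====
theorem count_patties_spec : Claim_equal_count_patties := by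
  intro L x _ hpre
  unfold Spec_count_patties count_patties count_patties_alt
  obtain ⟨h0, h51⟩ := hpre
  have hn : L.toNat ≤ 51 := by omega
  rw [alt_go_eq _ hn, zero_add]
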